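-- pv_equiv track=rewrite | github.com/ohiometa/rezonable | parsun.py | packBits
-- ===== SOURCE A (Python) =====
-- def packBits(fields, widths):
-- 	u = 0
-- 	shift = 0
-- 	for width, f in zip(widths, fields):
-- 		f &= (1 << width) - 1		# clamp to range
-- 		f <<= shift					# set in place
-- 		u |= f						# combine
-- 		shift += width				# next place
-- 	return u
-- ===== SOURCE B (Python) =====
-- def packBits(fields, widths):
-- 	if not fields or not widths:
-- 		return 0
-- 	w = widths[0]
-- 	return (fields[0] & ((1 << w) - 1)) + (packBits(fields[1:], widths[1:]) << w)
-- ===== Notes on version B (the rewrite author's own statement) =====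
-- stated objective: alternative
-- what changed: B is a structural recursion: it masks the first field and adds the recursively packed remaining fields shifted left by the first width, instead of A's single loop over zip maintaining a cumulative shift counter and OR-accumulating.
-- outside the precondition, e.g. on packBits([3], [-1]): A raises ValueError, B raises ValueError
import Mathlib
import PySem

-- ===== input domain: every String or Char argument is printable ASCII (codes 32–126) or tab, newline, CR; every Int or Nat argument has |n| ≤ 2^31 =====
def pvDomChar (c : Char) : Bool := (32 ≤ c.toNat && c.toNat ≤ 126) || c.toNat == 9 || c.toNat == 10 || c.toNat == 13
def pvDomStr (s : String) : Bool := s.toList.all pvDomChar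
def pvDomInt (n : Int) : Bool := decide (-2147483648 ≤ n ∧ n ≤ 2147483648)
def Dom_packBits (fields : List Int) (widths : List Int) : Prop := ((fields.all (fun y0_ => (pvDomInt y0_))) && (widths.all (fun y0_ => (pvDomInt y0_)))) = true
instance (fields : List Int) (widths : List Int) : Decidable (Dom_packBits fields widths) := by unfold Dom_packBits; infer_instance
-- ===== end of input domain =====

-- B packs the bit-fields by structural recursion (mask the first field, add the recursively
-- packed tail shifted by the first width) instead of A's loop with a cumulative shift
-- counter and OR-accumulation; same values, same cost.

-- ===== PORT A =====
-- state: (u, shift); per pair (width, f): f &= (1 << width) - 1; f <<= shift; u |= f; shift += width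
def packBits (fields : List Int) (widths : List Int) : Int :=
  ((widths.zip fields).foldl
    (fun (us : Int × Int) (wf : Int × Int) =>
      (PySem.Int.bor us.1
        ((PySem.Int.band wf.2 (((1:Int) <<< wf.1.toNat) - 1)) <<< us.2.toNat),
       us.2 + wf.1))
    (0, 0)).1

-- ===== PORT B =====
-- structural recursion: (fields[0] & mask) + (pack rest << widths[0]); 0 when either list ends
def packBits_alt : List Int → List Int → Int
  | [], _ => 0
  | _, [] => 0
  | f :: fs, w :: ws =>
      PySem.Int.band f (((1:Int) <<< w.toNat) - 1) + (packBits_alt fs ws <<< w.toNat)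

-- ===== PRECONDITION & SPEC =====
-- Pre_ excludes a negative width among the zipped pairs: there Python's `1 << width`
-- raises ValueError in A (and in B alike), so A returns no value.
def Pre_packBits (fields : List Int) (widths : List Int) : Prop :=
  ∀ p ∈ widths.zip fields, 0 ≤ p.1
instance (fields : List Int) (widths : List Int) : Decidable (Pre_packBits fields widths) := by unfold Pre_packBits; infer_instance

def pvWitness_packBits : List Int × List Int := ([5, -3, 9], [4, 3, 8])

def Spec_packBits (fields : List Int) (widths : List Int) (out : Int) : Prop := out = packBits_alt fields widths
instance (fields : List Int) (widths : List Int) (out : Int) : Decidable (Spec_packBits fields widths out) := by unfold Spec_packBits; infer_instance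

-- ===== CLAIM (what is proved, stated in full; the proofs are below) =====
def Claim_equal_packBits : Prop := ∀ (fields : List Int) (widths : List Int), Dom_packBits fields widths → Pre_packBits fields widths → Spec_packBits fields widths (packBits fields widths)

-- ===== LEMMAS AND PROOFS =====

-- the masked field value of one (width, field) pair
def pvMask (wf : Int × Int) : Int := PySem.Int.band wf.2 (((1:Int) <<< wf.1.toNat) - 1)

-- LSB-first value of a pair list (the number both programs compute)
def pvVal : List (Int × Int) → Int
  | [] => 0
  | wf :: t => pvMask wf + 2 ^ wf.1.toNat * pvVal t

theorem pvMask_nonneg (wf : Int × Int) : 0 ≤ pvMask wf := by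
  have hm : (0:Int) ≤ ((1:Int) <<< wf.1.toNat) - 1 := by
    rw [Int.shiftLeft_eq, one_mul]
    have : (1:Int) ≤ 2 ^ wf.1.toNat := one_le_pow₀ (by norm_num)
    omega
  unfold pvMask PySem.Int.band
  split_ifs <;> positivity

theorem shl_one_sub (w : Nat) : ((1:Int) <<< w) - 1 = (2:Int) ^ w - 1 := by
  rw [Int.shiftLeft_eq]; ring

theorem shl_one_sub_toNat (w : Nat) : (((1:Int) <<< w) - 1).toNat = 2 ^ w - 1 := by
  rw [shl_one_sub]
  have : ((2 : Int) ^ w) = ((2 ^ w : Nat) : Int) := by push_cast; ring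
  omega

theorem pvMask_lt (wf : Int × Int) : pvMask wf < 2 ^ wf.1.toNat := by
  have hm := shl_one_sub wf.1.toNat
  have hmt := shl_one_sub_toNat wf.1.toNat
  have hpos : (0 : Nat) < 2 ^ wf.1.toNat := by positivity
  have hcast : ((2 : Int) ^ wf.1.toNat) = ((2 ^ wf.1.toNat : Nat) : Int) := by push_cast; ring
  unfold pvMask PySem.Int.band
  split_ifs with h1 h2 h2
  · rw [hmt, Nat.and_two_pow_sub_one_eq_mod]
    have := Nat.mod_lt wf.2.toNat hpos
    omega
  · exact absurd (by rw [hm]; omega : (0:Int) ≤ (1:Int) <<< wf.1.toNat - 1) h2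
  · rw [hmt]
    have hle : 2 ^ wf.1.toNat - 1 - (2 ^ wf.1.toNat - 1 &&& (-wf.2 - 1).toNat) ≤ 2 ^ wf.1.toNat - 1 :=
      Nat.sub_le _ _
    omega
  · exact absurd (by rw [hm]; omega : (0:Int) ≤ (1:Int) <<< wf.1.toNat - 1) h2

-- one OR step is an addition, because the accumulated bits sit below the shift
theorem bor_step (u m : Int) (s : Nat) (hu : 0 ≤ u) (hub : u < 2 ^ s) (hm : 0 ≤ m) :
    PySem.Int.bor u (m <<< s) = u + m * 2 ^ s := by
  obtain ⟨a, rfl⟩ := Int.eq_ofNat_of_zero_le hu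
  obtain ⟨b, rfl⟩ := Int.eq_ofNat_of_zero_le hm
  have hcast : ((2 : Int) ^ s) = ((2 ^ s : Nat) : Int) := by push_cast; ring
  have ha : a < 2 ^ s := by omega
  rw [← Int.natCast_shiftLeft, PySem.Int.bor_natCast,
    Nat.lor_comm, ← Nat.shiftLeft_add_eq_or_of_lt ha, Nat.shiftLeft_eq]
  push_cast; ring

-- A's fold, characterised: starting from (u, s) it produces u + pvVal l · 2^s
theorem packA_fold (l : List (Int × Int)) (u : Int) (s : Nat)
    (hw : ∀ p ∈ l, 0 ≤ p.1) (hu : 0 ≤ u) (hub : u < 2 ^ s) :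
    (l.foldl
      (fun (us : Int × Int) (wf : Int × Int) =>
        (PySem.Int.bor us.1
          ((PySem.Int.band wf.2 (((1:Int) <<< wf.1.toNat) - 1)) <<< us.2.toNat),
         us.2 + wf.1))
      (u, (s : Int))).1 = u + pvVal l * 2 ^ s := by
  induction l generalizing u s with
  | nil => simp [pvVal]
  | cons wf t ih =>
    have hwt : ∀ p ∈ t, 0 ≤ p.1 := fun p hp => hw p (List.mem_cons_of_mem _ hp)
    have hwf : 0 ≤ wf.1 := hw wf (List.mem_cons_self ..)
    have hmn := pvMask_nonneg wf
    have hml := pvMask_lt wf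
    have hstep : PySem.Int.bor u (pvMask wf <<< s) = u + pvMask wf * 2 ^ s :=
      bor_step u (pvMask wf) s hu hub hmn
    have hshift : (s : Int) + wf.1 = ((s + wf.1.toNat : Nat) : Int) := by push_cast; omega
    have hub' : u + pvMask wf * 2 ^ s < 2 ^ (s + wf.1.toNat) := by
      have hp : (0:Int) < 2 ^ s := by positivity
      rw [pow_add]; nlinarith
    have hu' : 0 ≤ u + pvMask wf * 2 ^ s := add_nonneg hu (mul_nonneg hmn (by positivity))
    have hcast : ((s : Int)).toNat = s := by omega
    simp only [List.foldl_cons, hcast]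
    rw [show (PySem.Int.bor u ((PySem.Int.band wf.2 (((1:Int) <<< wf.1.toNat) - 1)) <<< s),
          (s : Int) + wf.1)
        = (u + pvMask wf * 2 ^ s, ((s + wf.1.toNat : Nat) : Int)) from by
      rw [← hshift]; exact congrArg (fun x => (x, (s : Int) + wf.1)) hstep]
    rw [ih _ _ hwt hu' hub']
    simp only [pvVal, pow_add]
    ring

-- B's recursion, characterised: it computes the LSB-first value of the zipped pairs
theorem packB_eq (fields widths : List Int) :
    packBits_alt fields widths = pvVal (widths.zip fields) := by
  induction fields generalizing widths with
  | nil => cases widths <;> simp [packBits_alt, pvVal]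
  | cons f fs ih =>
    cases widths with
    | nil => simp [packBits_alt, pvVal]
    | cons w ws =>
      simp only [packBits_alt, List.zip_cons_cons, pvVal, pvMask, ih, Int.shiftLeft_eq]
      ring

-- ===== VERDICT (by name: the statement is the Claim_ definition above) =====
theorem packBits_spec : Claim_equal_packBits := by
  intro fields widths _ hpre
  unfold Spec_packBits packBits
  have hA := packA_fold (widths.zip fields) 0 0 hpre (le_refl 0) (by norm_num)
  simp only [Nat.cast_zero] at hA
  rw [hA, packB_eq]
  ring
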